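-- pv_equiv track=rewrite | github.com/langdoc/eaf2korp | eaf2korp.py | get_lonely_lemmas
-- ===== SOURCE A (Python) =====
-- def get_lonely_lemmas(ambiguities):
--     lemmas = set([])
--     for analysis in ambiguities:
--         analysis_components = analysis[0].split("+")
--         lemmas.add(analysis_components[0])
--     if len(lemmas) == 1:
--         return(''.join(sorted(lemmas)))
--     else:
--         return("_")
-- ===== SOURCE B (Python) =====
-- def get_lonely_lemmas(ambiguities):
--     # Single forward pass with an early exit: track one representative lemma;
--     # bail out with "_" as soon as a second distinct lemma appears.
--     found = None
--     for analysis in ambiguities: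
--         comp = analysis[0].split("+")[0]
--         if found is None:
--             found = comp
--         elif comp != found:
--             return "_"
--     return found if found is not None else "_"
-- ===== Notes on version B (the rewrite author's own statement) =====
-- stated objective: simpler
-- what changed: Replaced building a set of all lemma prefixes and inspecting its size with a single-pass early-exit scan that keeps one representative lemma and returns '_' as soon as a second distinct lemma is seen.
import Mathlib
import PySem

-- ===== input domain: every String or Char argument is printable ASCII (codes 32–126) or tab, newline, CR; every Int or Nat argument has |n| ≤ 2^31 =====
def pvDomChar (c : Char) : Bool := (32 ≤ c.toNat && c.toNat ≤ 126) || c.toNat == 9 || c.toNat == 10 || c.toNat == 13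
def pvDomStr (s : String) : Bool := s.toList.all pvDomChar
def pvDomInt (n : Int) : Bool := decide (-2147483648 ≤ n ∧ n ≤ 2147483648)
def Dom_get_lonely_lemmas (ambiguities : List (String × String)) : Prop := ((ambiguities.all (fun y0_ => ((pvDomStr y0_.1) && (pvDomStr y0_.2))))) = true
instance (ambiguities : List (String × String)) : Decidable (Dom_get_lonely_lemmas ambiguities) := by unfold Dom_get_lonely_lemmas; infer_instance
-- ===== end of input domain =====

-- B replaces A's set-of-all-lemmas construction with a single-pass early-exit scan
-- keeping one representative lemma (objective: simpler). Return values only; no mutation.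

-- analysis[0].split("+")[0]: split? with the nonempty separator "+" always returns
-- some of a nonempty list, so .getD []/.headD "" are exact (never the defaults).
def pvComp (s : String) : String := ((PySem.Str.split? s "+").getD []).headD ""

-- ===== PORT A =====
def get_lonely_lemmas (ambiguities : List (String × String)) : String :=
  let lemmas : PySem.Set String :=
    ambiguities.foldl (fun lemmas analysis => PySem.Set.add lemmas (pvComp analysis.1))
      PySem.Set.empty
  if PySem.Set.len lemmas = 1 then
    PySem.Str.join "" (PySem.List.sorted lemmas (fun x => x) false)
  else "_"

-- ===== PORT B =====
def pvAltLoop (found : Option String) : List (String × String) → String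
  | [] => found.getD "_"
  | analysis :: rest =>
    let comp := pvComp analysis.1
    match found with
    | none => pvAltLoop (some comp) rest
    | some f => if comp ≠ f then "_" else pvAltLoop (some f) rest

def get_lonely_lemmas_alt (ambiguities : List (String × String)) : String :=
  pvAltLoop none ambiguities

-- ===== PRECONDITION & SPEC =====
def Spec_get_lonely_lemmas (ambiguities : List (String × String)) (out : String) : Prop := out = get_lonely_lemmas_alt ambiguities
instance (ambiguities : List (String × String)) (out : String) : Decidable (Spec_get_lonely_lemmas ambiguities out) := by unfold Spec_get_lonely_lemmas; infer_instance

-- ===== CLAIM (what is proved, stated in full; the proofs are below) =====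
def Claim_equal_get_lonely_lemmas : Prop := ∀ (ambiguities : List (String × String)), Dom_get_lonely_lemmas ambiguities → Spec_get_lonely_lemmas ambiguities (get_lonely_lemmas ambiguities)

-- ===== LEMMAS AND PROOFS =====

-- B's loop with a representative f returns f iff every remaining lemma equals f.
theorem pvAltLoop_some (rest : List (String × String)) (f : String) :
    pvAltLoop (some f) rest =
      (if rest.all (fun x => pvComp x.1 == f) then f else "_") := by
  induction rest with
  | nil => rfl
  | cons x t ih =>
    by_cases h : pvComp x.1 = f
    · have hb : (pvComp x.1 == f) = true := beq_iff_eq.mpr h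
      rw [show pvAltLoop (some f) (x :: t) = pvAltLoop (some f) t by
        simp [pvAltLoop, h], ih]
      simp only [List.all_cons, hb, Bool.true_and]
    · simp [pvAltLoop, h]

-- A's set after the fold, rephrased as a Set.update on the singleton {first lemma}.
theorem pvFoldSet (rest : List (String × String)) (f : String) :
    rest.foldl (fun s x => PySem.Set.add s (pvComp x.1)) [f] =
      PySem.Set.update [f] (rest.map (fun x => pvComp x.1)) := by
  rw [PySem.Set.update_map_eq_foldl_add]

theorem pvCons_case (rest : List (String × String)) (f : String) :
    (let s := PySem.Set.update [f] (rest.map (fun x => pvComp x.1))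
     if PySem.Set.len s = 1 then
       PySem.Str.join "" (PySem.List.sorted s (fun x => x) false)
     else "_") =
      (if rest.all (fun x => pvComp x.1 == f) then f else "_") := by
  by_cases h : rest.all (fun x => pvComp x.1 == f)
  · -- every lemma equals f: the set is exactly [f]
    have hall : ∀ x ∈ rest, pvComp x.1 = f := by
      intro x hx
      have := List.all_eq_true.mp h x hx
      simpa using this
    have hs : PySem.Set.update [f] (rest.map (fun x => pvComp x.1)) = [f] := by
      rw [PySem.Set.update_eq_append_filter]
      have : (PySem.Set.ofList (rest.map (fun x => pvComp x.1))).filter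
          (fun y => !(PySem.Set.contains [f] y)) = [] := by
        rw [List.filter_eq_nil_iff]
        intro y hy
        have : y ∈ rest.map (fun x => pvComp x.1) := (PySem.Set.mem_ofList _ _).mp hy
        obtain ⟨x, hx, rfl⟩ := List.mem_map.mp this
        simp [hall x hx, PySem.Set.contains]
      rw [this, List.append_nil]
    simp only [hs, h, if_true]
    have hsorted : PySem.List.sorted [f] (fun x => x) false = [f] :=
      PySem.List.sorted_eq_self_of_pairwise [f] (fun x => x) (by simp)
    simp [PySem.Set.len, hsorted, PySem.Str.join]
  · -- a second distinct lemma exists: the set has ≥ 2 elements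
    simp only [h]
    have ⟨x, hx, hne⟩ : ∃ x ∈ rest, pvComp x.1 ≠ f := by
      by_contra hc
      push Not at hc
      exact h (List.all_eq_true.mpr (fun x hx => by simp [hc x hx]))
    set s := PySem.Set.update [f] (rest.map (fun x => pvComp x.1)) with hsdef
    have hfmem : f ∈ s := (PySem.Set.mem_update _ _ _).mpr (Or.inl (by simp))
    have hcmem : pvComp x.1 ∈ s :=
      (PySem.Set.mem_update _ _ _).mpr (Or.inr (List.mem_map.mpr ⟨x, hx, rfl⟩))
    have hlen : s.length ≠ 1 := by
      intro h1
      obtain ⟨y, hy⟩ := List.length_eq_one_iff.mp h1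
      rw [hy] at hfmem hcmem
      exact hne ((List.mem_singleton.mp hcmem).trans (List.mem_singleton.mp hfmem).symm)
    have hn : ¬ (PySem.Set.len s = 1) := by
      simp only [PySem.Set.len]
      exact_mod_cast fun hh => hlen (by exact_mod_cast hh)
    rw [if_neg hn]
    simp

theorem pv_main (ambiguities : List (String × String)) :
    get_lonely_lemmas ambiguities = get_lonely_lemmas_alt ambiguities := by
  cases ambiguities with
  | nil => rfl
  | cons a rest =>
    show (let lemmas := (a :: rest).foldl
            (fun s x => PySem.Set.add s (pvComp x.1)) PySem.Set.empty
          if PySem.Set.len lemmas = 1 then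
            PySem.Str.join "" (PySem.List.sorted lemmas (fun x => x) false)
          else "_") = pvAltLoop none (a :: rest)
    have h0 : (a :: rest).foldl (fun s x => PySem.Set.add s (pvComp x.1)) PySem.Set.empty
        = rest.foldl (fun s x => PySem.Set.add s (pvComp x.1)) [pvComp a.1] := by
      simp [PySem.Set.empty, PySem.Set.add, PySem.Set.contains]
    have hB : pvAltLoop none (a :: rest) = pvAltLoop (some (pvComp a.1)) rest := rfl
    rw [h0, pvFoldSet, hB, pvAltLoop_some]
    exact pvCons_case rest (pvComp a.1)

-- ===== VERDICT (by name: the statement is the Claim_ definition above) =====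
theorem get_lonely_lemmas_spec : Claim_equal_get_lonely_lemmas := by
  intro ambiguities _
  exact pv_main ambiguities
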